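-- pv_equiv track=rewrite | github.com/eronekogin/leetcode | 2022/find_a_value_of_a_mysterious_function_closest_to_target.py | closestToTarget
-- ===== SOURCE A (Python) =====
-- def closestToTarget(arr: list[int], target: int) -> int:
--     """
--     1. Suppose a1 = arr[i], a2 = arr[i] & arr[i + 1], a3 = ..., we have
--         a1 >= a2 >= a3, as AND operation does not set any bit, so either
--         the 1 bit becomes zero, or to remain 1 bit.
--     2. subArrayAnds[i] = arr[i] & subArrayAnds[i + 1].
--     3. suppose and[i:j] stands for the and values of subarray starting at
--         index i with length j, then we have:
--             and[i:j]
--                 = arr[i] & and[i+1:j-1]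
--                 = arr[i] & arr[i+1] & and[i+2:j-2]
--                 = arr[i] & arr[i+1] & arr[i+2] & and[i+3:j-3]
--                 = ...
--         Eventually all the and[i:j] will be inside subArrayAnds.
--     4. So we could just iterate on subArrayAnds and check the absolute
--         value of subArrayAnd - target for each subArrayAnd.
--     """
--     N = len(arr)
--     subArrayAnds: list[set[int]] = [set() for _ in range(N)]
--     subArrayAnds[-1].add(arr[-1])
--
--     # Calculate sub array ands.
--     for i in range(N - 2, -1, -1):
--         subArrayAnds[i].add(arr[i])
--         for val in subArrayAnds[i + 1]:
--             subArrayAnds[i].add(arr[i] & val)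
--
--     # Calculate result.
--     rslt = float('inf')
--     for subArrayAnd in subArrayAnds:
--         for val in subArrayAnd:
--             rslt = min(rslt, abs(val - target))
--
--     return rslt
-- ===== SOURCE B (Python) =====
-- def closestToTarget(arr: list[int], target: int) -> int:
--     n = len(arr)
--     suffix = [0] * n
--     acc = -1
--     for i in range(n - 1, -1, -1):
--         acc &= arr[i]
--         suffix[i] = acc
--     rslt = abs(arr[0] - target)
--     for i in range(n):
--         si = suffix[i]
--         acc = arr[i]
--         rslt = min(rslt, abs(acc - target))
--         if acc == si:
--             continue
--         for j in range(i + 1, n):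
--             a2 = acc & arr[j]
--             if a2 != acc:
--                 acc = a2
--                 rslt = min(rslt, abs(acc - target))
--                 if acc == si:
--                     break
--     return rslt
-- ===== Notes on version B (the rewrite author's own statement) =====
-- stated objective: alternative
-- what changed: B drops A's per-position AND-value sets entirely: it enumerates subarrays directly with a running AND per start index, folding a value in only when the AND changes, and uses one precomputed suffix-AND array for an exact early break (a growing window's AND only loses bits, so once it equals the suffix AND it can never change again).
import Mathlib
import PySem

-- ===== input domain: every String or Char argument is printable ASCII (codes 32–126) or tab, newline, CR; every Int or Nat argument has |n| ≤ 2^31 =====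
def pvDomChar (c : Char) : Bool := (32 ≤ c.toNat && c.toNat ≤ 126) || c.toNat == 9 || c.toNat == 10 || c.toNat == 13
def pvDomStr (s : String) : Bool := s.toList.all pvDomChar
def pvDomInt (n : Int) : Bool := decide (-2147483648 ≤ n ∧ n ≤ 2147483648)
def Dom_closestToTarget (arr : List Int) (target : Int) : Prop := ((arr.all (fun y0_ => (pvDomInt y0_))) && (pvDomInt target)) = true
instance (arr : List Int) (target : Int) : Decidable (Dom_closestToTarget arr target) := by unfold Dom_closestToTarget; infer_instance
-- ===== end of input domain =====

-- B replaces A's backward-built list of N AND-sets plus a final scan by direct subarray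
-- enumeration with a running AND, pruned exactly by a precomputed suffix-AND array (objective: alternative).
-- Python A raises IndexError on the empty list (arr[-1]); Pre_ excludes exactly that input.

-- ===== PORT A =====
-- helper: the body of A's backward index loop ("for i in range(N-2, -1, -1): ...")
def stepF (arr : List Int) (st : List (PySem.Set Int)) (i : Int) : List (PySem.Set Int) :=
  let si := PySem.Set.add (PySem.List.pyGetD st i PySem.Set.empty) (PySem.List.pyGetD arr i 0)
  let si := (PySem.List.pyGetD st (i + 1) PySem.Set.empty).foldl
    (fun s v => PySem.Set.add s (PySem.Int.band (PySem.List.pyGetD arr i 0) v)) si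
  PySem.List.pySetD st i si

def closestToTarget (arr : List Int) (target : Int) : Int :=
  let N : Int := PySem.List.len arr
  -- subArrayAnds = [set() for _ in range(N)]
  let subArrayAnds : List (PySem.Set Int) := (PySem.List.pyRange 0 N 1).map (fun _ => PySem.Set.empty)
  -- subArrayAnds[-1].add(arr[-1])
  match PySem.List.pyGet? arr (-1) with
  | none => 0  -- IndexError: excluded by Pre_closestToTarget
  | some last =>
    let st0 := PySem.List.pySetD subArrayAnds (-1)
      (PySem.Set.add (PySem.List.pyGetD subArrayAnds (-1) PySem.Set.empty) last)
    let st1 := (PySem.List.pyRange (N - 2) (-1) (-1)).foldl (stepF arr) st0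
    -- rslt = float('inf') (modelled as ⊤); for each set, for each val: rslt = min(rslt, abs(val - target))
    let rslt : WithTop Int := st1.foldl (fun r s =>
      s.foldl (fun r v => min r ((|v - target| : Int) : WithTop Int)) r) ⊤
    match rslt with
    | none => 0  -- float('inf'): only for the empty list, excluded by Pre_closestToTarget
    | some m => m

-- ===== PORT B =====
-- helper: the body of B's backward suffix pass ("for i in range(n-1, -1, -1): acc &= arr[i]; suffix[i] = acc")
def stepS (arr : List Int) (st : List Int × Int) (i : Int) : List Int × Int :=
  let acc := PySem.Int.band st.2 (PySem.List.pyGetD arr i 0)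
  (PySem.List.pySetD st.1 i acc, acc)

-- helper: B's inner loop "for j in range(i+1, n): a2 = acc & arr[j]; if a2 != acc: ... break"
def innerB (arr : List Int) (target : Int) (s : Int) : List Int → Int → Int → Int
  | [], r, _ => r
  | j :: js, r, acc =>
    let a := PySem.Int.band acc (PySem.List.pyGetD arr j 0)
    if a ≠ acc then
      if a = s then min r |a - target|
      else innerB arr target s js (min r |a - target|) a
    else innerB arr target s js r acc

def closestToTarget_alt (arr : List Int) (target : Int) : Int :=
  let n : Int := PySem.List.len arr
  -- suffix = [0] * n; acc = -1; for i in range(n-1, -1, -1): acc &= arr[i]; suffix[i] = acc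
  let p := (PySem.List.pyRange (n - 1) (-1) (-1)).foldl (stepS arr)
    (PySem.List.pyRepeat [(0 : Int)] n, -1)
  match PySem.List.pyGet? arr 0 with
  | none => 0  -- IndexError on arr[0]: excluded by Pre_closestToTarget
  | some a0 =>
    (PySem.List.pyRange 0 n 1).foldl (fun r i =>
      -- si = suffix[i]; acc = arr[i]; rslt = min(rslt, abs(acc - target)); if acc == si: continue; else inner loop
      if PySem.List.pyGetD arr i 0 = PySem.List.pyGetD p.1 i 0 then
        min r |PySem.List.pyGetD arr i 0 - target|
      else innerB arr target (PySem.List.pyGetD p.1 i 0) (PySem.List.pyRange (i + 1) n 1)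
        (min r |PySem.List.pyGetD arr i 0 - target|) (PySem.List.pyGetD arr i 0))
      (|a0 - target|)

-- ===== PRECONDITION & SPEC =====
-- Pre_ excludes only the empty list, on which the Python A raises IndexError at arr[-1].
def Pre_closestToTarget (arr : List Int) (target : Int) : Prop := arr ≠ []
instance (arr : List Int) (target : Int) : Decidable (Pre_closestToTarget arr target) := by unfold Pre_closestToTarget; infer_instance
def pvWitness_closestToTarget : List Int × Int := ([5, 3, 9], 2)
def Spec_closestToTarget (arr : List Int) (target : Int) (out : Int) : Prop := out = closestToTarget_alt arr target
instance (arr : List Int) (target : Int) (out : Int) : Decidable (Spec_closestToTarget arr target out) := by unfold Spec_closestToTarget; infer_instance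

-- ===== CLAIM (what is proved, stated in full; the proofs are below) =====
def Claim_equal_closestToTarget : Prop := ∀ (arr : List Int) (target : Int), Dom_closestToTarget arr target → Pre_closestToTarget arr target → Spec_closestToTarget arr target (closestToTarget arr target)

-- ===== LEMMAS AND PROOFS =====

-- ---- generic bitwise facts: PySem.Int.band is associative ----
theorem nat_sub_and_eq_ldiff : ∀ (m k : Nat), m - (m &&& k) = Nat.ldiff m k := by
  intro m
  induction m using Nat.binaryRec with
  | zero => intro k; simp [Nat.ldiff]
  | bit b m ih =>
    intro k
    obtain ⟨c, k', rfl⟩ : ∃ c k', k = Nat.bit c k' :=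
      ⟨k.testBit 0, k / 2, (Nat.bit_testBit_zero_shiftRight_one k).symm⟩
    rw [Nat.land_bit, Nat.ldiff_bit, ← ih k']
    have h1 := Nat.and_le_left (n := m) (m := k')
    simp [Nat.bit_val]
    cases b <;> cases c <;> simp <;> omega

theorem band_testBit (a b : Int) (i : Nat) :
    (PySem.Int.band a b).testBit i = (a.testBit i && b.testBit i) := by
  cases a with
  | ofNat m => cases b with
    | ofNat n => simp [PySem.Int.band, Int.testBit]
    | negSucc n => simp [PySem.Int.band, Int.testBit, nat_sub_and_eq_ldiff, Nat.testBit_ldiff]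
  | negSucc m => cases b with
    | ofNat n =>
      simp [PySem.Int.band, Int.testBit, nat_sub_and_eq_ldiff, Nat.testBit_ldiff, Bool.and_comm]
    | negSucc n =>
      have h : -((m ||| n : Nat) : Int) - 1 = Int.negSucc (m ||| n) := by
        rw [Int.negSucc_eq]; ring
      simp [PySem.Int.band, h, Int.testBit]

theorem int_ext {x y : Int} (h : ∀ i, x.testBit i = y.testBit i) : x = y := by
  cases x with
  | ofNat m => cases y with
    | ofNat n => exact congrArg Int.ofNat (Nat.eq_of_testBit_eq h)
    | negSucc n =>
      exfalso
      have hi := h (m + n)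
      have h1 : m.testBit (m + n) = false :=
        Nat.testBit_lt_two_pow (lt_of_le_of_lt (Nat.le_add_right m n) Nat.lt_two_pow_self)
      have h2 : n.testBit (m + n) = false :=
        Nat.testBit_lt_two_pow (lt_of_le_of_lt (Nat.le_add_left n m) Nat.lt_two_pow_self)
      simp [Int.testBit, h1, h2] at hi
  | negSucc m => cases y with
    | ofNat n =>
      exfalso
      have hi := h (m + n)
      have h1 : m.testBit (m + n) = false :=
        Nat.testBit_lt_two_pow (lt_of_le_of_lt (Nat.le_add_right m n) Nat.lt_two_pow_self)
      have h2 : n.testBit (m + n) = false :=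
        Nat.testBit_lt_two_pow (lt_of_le_of_lt (Nat.le_add_left n m) Nat.lt_two_pow_self)
      simp [Int.testBit, h1, h2] at hi
    | negSucc n =>
      have : m = n := Nat.eq_of_testBit_eq (fun i => by have := h i; simpa [Int.testBit] using this)
      rw [this]

theorem band_assoc (a b c : Int) :
    PySem.Int.band (PySem.Int.band a b) c = PySem.Int.band a (PySem.Int.band b c) := by
  apply int_ext; intro i; simp [band_testBit, Bool.and_assoc]

-- ---- the AND-value of a nonempty segment ----
def andOf : List Int → Int
  | [] => 0
  | h :: t => t.foldl PySem.Int.band h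

theorem band_foldl_band (t : List Int) : ∀ (h x : Int),
    PySem.Int.band x (t.foldl PySem.Int.band h) = t.foldl PySem.Int.band (PySem.Int.band x h) := by
  induction t with
  | nil => intro h x; rfl
  | cons c t ih => intro h x; simp only [List.foldl_cons, ih, band_assoc]

theorem andOf_cons (x : Int) (p : List Int) (hp : p ≠ []) :
    andOf (x :: p) = PySem.Int.band x (andOf p) := by
  cases p with
  | nil => exact absurd rfl hp
  | cons h t => simp [andOf, band_foldl_band]

-- Seg arr v: v is the AND of some nonempty contiguous segment of arr
def Seg (arr : List Int) (v : Int) : Prop := ∃ m, m ≠ [] ∧ m <:+: arr ∧ v = andOf m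

-- ---- generic min-fold facts (used for the A side) ----
theorem foldl_min_le {α : Type} [LinearOrder α] (f : Int → α) (l : List Int) :
    ∀ (init : α), (l.foldl (fun r v => min r (f v)) init) ≤ init ∧
      ∀ x ∈ l, (l.foldl (fun r v => min r (f v)) init) ≤ f x := by
  induction l with
  | nil => intro init; simp
  | cons h t ih =>
    intro init
    obtain ⟨h1, h2⟩ := ih (min init (f h))
    refine ⟨le_trans h1 (min_le_left _ _), ?_⟩
    intro x hx
    rcases List.mem_cons.mp hx with rfl | hx
    · exact le_trans h1 (min_le_right _ _)
    · exact h2 x hx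

theorem foldl_min_attained {α : Type} [LinearOrder α] (f : Int → α) (l : List Int) :
    ∀ (init : α), (l.foldl (fun r v => min r (f v)) init) = init ∨
      ∃ x ∈ l, (l.foldl (fun r v => min r (f v)) init) = f x := by
  induction l with
  | nil => intro init; simp
  | cons h t ih =>
    intro init
    rcases ih (min init (f h)) with h1 | ⟨x, hx, h1⟩
    · rcases min_cases init (f h) with ⟨he, _⟩ | ⟨he, _⟩
      · exact Or.inl (by simpa [he] using h1)
      · exact Or.inr ⟨h, List.mem_cons_self .., by simpa [he] using h1⟩
    · exact Or.inr ⟨x, List.mem_cons_of_mem _ hx, h1⟩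

-- ---- A-side: the backward-built sets ----
def stepSet (x : Int) (prev : PySem.Set Int) : PySem.Set Int :=
  prev.foldl (fun s v => PySem.Set.add s (PySem.Int.band x v)) (PySem.Set.add PySem.Set.empty x)

def backSets : List Int → List (PySem.Set Int)
  | [] => []
  | x :: r => stepSet x ((backSets r).headD PySem.Set.empty) :: backSets r

theorem mem_stepSet (x : Int) (prev : PySem.Set Int) (v : Int) :
    v ∈ stepSet x prev ↔ v = x ∨ ∃ a ∈ prev, v = PySem.Int.band x a := by
  unfold stepSet
  rw [PySem.Set.mem_foldl_add prev (fun a => PySem.Int.band x a)]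
  simp

theorem mem_head_backSets (l : List Int) (v : Int) :
    v ∈ (backSets l).headD PySem.Set.empty ↔ ∃ p, p ≠ [] ∧ p <+: l ∧ v = andOf p := by
  induction l generalizing v with
  | nil => simp [backSets, PySem.Set.empty]
  | cons x r ih =>
    simp only [backSets, List.headD_cons, mem_stepSet]
    constructor
    · rintro (hv | ⟨a, ha, hv⟩)
      · exact ⟨[x], by simp, ⟨r, rfl⟩, by simp [andOf, hv]⟩
      · obtain ⟨p, hp, hpr, ha'⟩ := (ih a).mp ha
        exact ⟨x :: p, by simp, List.cons_prefix_cons.mpr ⟨rfl, hpr⟩,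
          by rw [hv, ha', andOf_cons x p hp]⟩
    · rintro ⟨p, hp, hpr, hv⟩
      cases p with
      | nil => exact absurd rfl hp
      | cons y p' =>
        obtain ⟨rfl, hp'⟩ := List.cons_prefix_cons.mp hpr
        cases p' with
        | nil => left; simpa [andOf] using hv
        | cons z t =>
          right
          exact ⟨andOf (z :: t), (ih _).mpr ⟨z :: t, by simp, hp', rfl⟩,
            by rw [hv, andOf_cons y (z :: t) (by simp)]⟩

theorem mem_flatten_backSets (arr : List Int) (v : Int) :
    v ∈ (backSets arr).flatten ↔ Seg arr v := by
  induction arr generalizing v with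
  | nil => simp [backSets, Seg]
  | cons x r ih =>
    simp only [backSets, List.flatten_cons, List.mem_append, ih]
    constructor
    · rintro (hv | ⟨m, hm, hmr, hv⟩)
      · obtain ⟨p, hp, hpr, hv⟩ := (mem_head_backSets (x :: r) v).mp (by simpa [backSets] using hv)
        exact ⟨p, hp, hpr.isInfix, hv⟩
      · exact ⟨m, hm, List.infix_cons hmr, hv⟩
    · rintro ⟨m, hm, hmr, hv⟩
      rcases List.infix_cons_iff.mp hmr with hpfx | hinf
      · have := (mem_head_backSets (x :: r) v).mpr ⟨m, hm, hpfx, hv⟩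
        exact Or.inl (by simpa [backSets] using this)
      · exact Or.inr ⟨m, hm, hinf, hv⟩

theorem Seg_head (a0 : Int) (rest : List Int) : Seg (a0 :: rest) a0 :=
  ⟨[a0], by simp, ⟨[], rest, by simp⟩, by simp [andOf]⟩

theorem backSets_length (l : List Int) : (backSets l).length = l.length := by
  induction l with
  | nil => rfl
  | cons x r ih => simp [backSets, ih]

theorem stepA (arr : List Int) (j : Nat) (hj : j + 2 ≤ arr.length) :
    stepF arr (List.replicate (j + 1) PySem.Set.empty ++ backSets (arr.drop (j + 1))) (j : Int)
      = List.replicate j PySem.Set.empty ++ backSets (arr.drop j) := by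
  have hjlen : j + 1 < arr.length := by omega
  have hdrop : arr.drop j = arr[j] :: arr.drop (j + 1) := List.drop_eq_getElem_cons (by omega)
  have hdrop1 : arr.drop (j + 1) = arr[j + 1] :: arr.drop (j + 2) := List.drop_eq_getElem_cons hjlen
  have g1 : PySem.List.pyGetD (List.replicate (j + 1) (PySem.Set.empty : PySem.Set Int)
      ++ backSets (arr.drop (j + 1))) (j : Int) PySem.Set.empty = PySem.Set.empty := by
    rw [PySem.List.pyGetD_natCast]
    rw [List.getD_eq_getElem _ _ (by simp [backSets_length]; omega)]
    rw [List.getElem_append_left (by simp)]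
    simp
  have g2 : PySem.List.pyGetD arr (j : Int) 0 = arr[j] := by
    rw [PySem.List.pyGetD_natCast]
    exact List.getD_eq_getElem _ _ (by omega)
  have g3 : PySem.List.pyGetD (List.replicate (j + 1) (PySem.Set.empty : PySem.Set Int)
      ++ backSets (arr.drop (j + 1))) ((j : Int) + 1) PySem.Set.empty
      = (backSets (arr.drop (j + 1))).headD PySem.Set.empty := by
    have : ((j : Int) + 1) = ((j + 1 : Nat) : Int) := by push_cast; ring
    rw [this, PySem.List.pyGetD_natCast]
    rw [List.getD_eq_getElem _ _ (by simp [backSets_length]; omega)]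
    rw [List.getElem_append_right (by simp)]
    obtain ⟨c, cs, hbs⟩ : ∃ c cs, backSets (arr.drop (j + 1)) = c :: cs := by
      rw [hdrop1]; exact ⟨_, _, rfl⟩
    simp [hbs]
  unfold stepF
  rw [g1, g2, g3]
  rw [PySem.List.pySetD_natCast]
  rw [List.replicate_succ', List.append_assoc, List.set_append]
  simp only [List.length_replicate, lt_irrefl, if_false, Nat.sub_self]
  rw [hdrop, List.singleton_append, List.set_cons_zero]
  rfl

theorem foldA (arr : List Int) : ∀ (j : Nat), j + 2 ≤ arr.length →
    (PySem.List.pyRange (j : Int) (-1) (-1)).foldl (stepF arr)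
      (List.replicate (j + 1) PySem.Set.empty ++ backSets (arr.drop (j + 1))) = backSets arr := by
  intro j
  induction j with
  | zero =>
    intro hj
    have hr : PySem.List.pyRange ((0 : Nat) : Int) (-1) (-1) = [((0 : Nat) : Int)] := by
      rw [PySem.List.pyRange_neg_one_cons (by norm_num)]
      rw [show ((0 : Nat) : Int) - 1 = -1 by norm_num,
        PySem.List.pyRange_neg_one_eq_nil le_rfl]
    rw [hr, List.foldl_cons, List.foldl_nil]
    simpa using stepA arr 0 hj
  | succ j ih =>
    intro hj
    rw [PySem.List.pyRange_neg_one_cons (by push_cast; omega)]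
    have h1 : ((j + 1 : Nat) : Int) - 1 = (j : Int) := by push_cast; ring
    rw [List.foldl_cons, stepA arr (j + 1) hj, h1]
    exact ih (by omega)

theorem pyGet?_neg_one (arr : List Int) (hne : arr ≠ []) :
    PySem.List.pyGet? arr (-1) = some (arr[arr.length - 1]'(by
      have := List.length_pos_iff.mpr hne; omega)) := by
  have hlen : 1 ≤ arr.length := List.length_pos_iff.mpr hne
  simp only [PySem.List.pyGet?, PySem.List.pyIdx?]
  have h2 : -(arr.length : Int) ≤ -1 := by omega
  simp [h2]

theorem st0_eq (arr : List Int) (hne : arr ≠ []) (last : Int)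
    (hlast : last = arr[arr.length - 1]'(by have := List.length_pos_iff.mpr hne; omega)) :
    PySem.List.pySetD ((PySem.List.pyRange 0 (PySem.List.len arr) 1).map (fun _ => (PySem.Set.empty : PySem.Set Int))) (-1)
      (PySem.Set.add (PySem.List.pyGetD ((PySem.List.pyRange 0 (PySem.List.len arr) 1).map (fun _ => (PySem.Set.empty : PySem.Set Int))) (-1) PySem.Set.empty) last)
      = List.replicate (arr.length - 1) PySem.Set.empty ++ backSets (arr.drop (arr.length - 1)) := by
  have hlen : 1 ≤ arr.length := List.length_pos_iff.mpr hne
  have hrep : (PySem.List.pyRange 0 (PySem.List.len arr) 1).map (fun _ => (PySem.Set.empty : PySem.Set Int))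
      = List.replicate arr.length PySem.Set.empty := by
    rw [PySem.List.len_eq, PySem.List.pyRange_zero, List.map_map]
    rw [show ((fun _ => (PySem.Set.empty : PySem.Set Int)) ∘ (fun k : Nat => (k : Int))) = (fun _ : Nat => (PySem.Set.empty : PySem.Set Int)) from rfl]
    rw [List.map_const']
    simp
  rw [hrep]
  have hget : PySem.List.pyGetD (List.replicate arr.length (PySem.Set.empty : PySem.Set Int)) (-1) PySem.Set.empty
      = PySem.Set.empty := by
    rw [PySem.List.pyGetD_neg_ofNat _ 1 _ (by norm_num) (by simpa using hlen)]
    simp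
  rw [hget]
  have hset : PySem.List.pySetD (List.replicate arr.length (PySem.Set.empty : PySem.Set Int)) (-1)
      (PySem.Set.add PySem.Set.empty last)
      = (List.replicate arr.length (PySem.Set.empty : PySem.Set Int)).set (arr.length - 1)
        (PySem.Set.add PySem.Set.empty last) := by
    simp only [PySem.List.pySetD, PySem.List.pySet?, PySem.List.pyIdx?]
    have h2 : -(arr.length : Int) ≤ -1 := by omega
    simp [h2]
  rw [hset]
  obtain ⟨n, hn⟩ : ∃ n, arr.length = n + 1 := ⟨arr.length - 1, by omega⟩
  have hdrop : arr.drop n = [arr[n]'(by omega)] := by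
    rw [List.drop_eq_getElem_cons (by omega), List.drop_eq_nil_iff.mpr (by omega)]
  rw [hn]
  simp only [Nat.add_sub_cancel]
  rw [List.replicate_succ', List.set_append]
  simp only [List.length_replicate, lt_irrefl, if_false, Nat.sub_self, List.set_cons_zero]
  rw [hdrop]
  have hb : backSets [arr[n]'(by omega)] = [PySem.Set.add PySem.Set.empty (arr[n]'(by omega))] := rfl
  rw [hb]
  have hl2 : last = arr[n]'(by omega) := by rw [hlast]; congr 1; omega
  rw [hl2]

theorem st1_eq (arr : List Int) (hne : arr ≠ []) :
    (PySem.List.pyRange (PySem.List.len arr - 2) (-1) (-1)).foldl (stepF arr)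
      (List.replicate (arr.length - 1) PySem.Set.empty ++ backSets (arr.drop (arr.length - 1)))
      = backSets arr := by
  have hlen : 1 ≤ arr.length := List.length_pos_iff.mpr hne
  rw [PySem.List.len_eq]
  by_cases h2 : 2 ≤ arr.length
  · have hc : (arr.length : Int) - 2 = ((arr.length - 2 : Nat) : Int) := by push_cast [h2]; omega
    have hc2 : arr.length - 1 = (arr.length - 2) + 1 := by omega
    rw [hc, hc2]
    exact foldA arr (arr.length - 2) (by omega)
  · have h1 : arr.length = 1 := by omega
    rw [PySem.List.pyRange_neg_one_eq_nil (by rw [h1]; norm_num)]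
    rw [List.foldl_nil, h1]
    simp

theorem A_eq (arr : List Int) (target : Int) (hne : arr ≠ []) :
    ∃ m : Int, closestToTarget arr target = m ∧
      (∃ v, Seg arr v ∧ m = |v - target|) ∧ (∀ v, Seg arr v → m ≤ |v - target|) := by
  have hlen : 1 ≤ arr.length := List.length_pos_iff.mpr hne
  unfold closestToTarget
  rw [pyGet?_neg_one arr hne]
  simp only
  rw [st0_eq arr hne _ rfl, st1_eq arr hne]
  rw [List.foldl_flatten (f := fun (r : WithTop Int) (v : Int) => min r ((|v - target| : Int) : WithTop Int)) (b := ⊤) (L := backSets arr) |>.symm]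
  set F : Int → WithTop Int := fun v => ((|v - target| : Int) : WithTop Int) with hF
  have hle := foldl_min_le F (backSets arr).flatten (⊤ : WithTop Int)
  have hat := foldl_min_attained F (backSets arr).flatten (⊤ : WithTop Int)
  set R : WithTop Int := (backSets arr).flatten.foldl (fun r v => min r (F v)) ⊤ with hR
  obtain ⟨a0, rest, rfl⟩ : ∃ a0 rest, arr = a0 :: rest := by
    cases arr with
    | nil => exact absurd rfl hne
    | cons a0 rest => exact ⟨a0, rest, rfl⟩
  have hmem0 : a0 ∈ (backSets (a0 :: rest)).flatten :=
    (mem_flatten_backSets _ _).mpr (Seg_head a0 rest)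
  rcases hat with htop | ⟨w, hw, hweq⟩
  · exfalso
    have := hle.2 a0 hmem0
    rw [htop] at this
    exact absurd (top_le_iff.mp this) (by simp [hF])
  · have hwSeg : Seg (a0 :: rest) w := (mem_flatten_backSets _ _).mp hw
    refine ⟨|w - target|, ?_, ⟨w, hwSeg, rfl⟩, ?_⟩
    · rw [hweq]
    · intro v hv
      have hvm : v ∈ (backSets (a0 :: rest)).flatten := (mem_flatten_backSets _ _).mpr hv
      have h := hle.2 v hvm
      rw [hweq] at h
      simp only [hF] at h
      exact_mod_cast h

-- ---- B-side: direct enumeration with suffix-AND pruning ----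

theorem band_neg_one_left (x : Int) : PySem.Int.band (-1) x = x := by
  rw [PySem.Int.band_comm]; exact PySem.Int.band_neg_one x

theorem foldl_band_rev_eq_andOf : ∀ (l : List Int), l ≠ [] →
    l.reverse.foldl PySem.Int.band (-1) = andOf l := by
  intro l
  induction l with
  | nil => intro h; exact absurd rfl h
  | cons x t ih =>
    intro _
    cases t with
    | nil => simp [andOf, band_neg_one_left]
    | cons y u =>
      rw [List.reverse_cons, List.foldl_append, ih (by simp), List.foldl_cons, List.foldl_nil,
        andOf_cons x (y :: u) (by simp), PySem.Int.band_comm]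

-- the suffix-AND list: suffList l = [andOf (l.drop 0), andOf (l.drop 1), …]
def suffList : List Int → List Int
  | [] => []
  | x :: t => andOf (x :: t) :: suffList t

theorem suffList_getD (l : List Int) : ∀ (k : Nat), k < l.length →
    (suffList l).getD k 0 = andOf (l.drop k) := by
  induction l with
  | nil => intro k hk; simp at hk
  | cons x t ih =>
    intro k hk
    cases k with
    | zero => simp [suffList]
    | succ k => simpa [suffList] using ih k (by simpa using Nat.lt_of_succ_lt_succ hk)

-- one step of the backward suffix pass
theorem stepS_eq (arr : List Int) (j : Nat) (hj : j + 1 ≤ arr.length) :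
    stepS arr
      (List.replicate (j + 1) 0 ++ suffList (arr.drop (j + 1)),
        (arr.drop (j + 1)).reverse.foldl PySem.Int.band (-1)) (j : Int)
      = (List.replicate j 0 ++ suffList (arr.drop j),
        (arr.drop j).reverse.foldl PySem.Int.band (-1)) := by
  unfold stepS
  have hjlt : j < arr.length := by omega
  have hdrop : arr.drop j = arr[j] :: arr.drop (j + 1) := List.drop_eq_getElem_cons hjlt
  have g2 : PySem.List.pyGetD arr (j : Int) 0 = arr[j] := by
    rw [PySem.List.pyGetD_natCast]
    exact List.getD_eq_getElem _ _ (by omega)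
  have hacc : PySem.Int.band ((arr.drop (j + 1)).reverse.foldl PySem.Int.band (-1)) arr[j]
      = (arr.drop j).reverse.foldl PySem.Int.band (-1) := by
    rw [hdrop, List.reverse_cons, List.foldl_append, List.foldl_cons, List.foldl_nil]
  have haccAnd : (arr.drop j).reverse.foldl PySem.Int.band (-1) = andOf (arr.drop j) :=
    foldl_band_rev_eq_andOf _ (fun h => by rw [List.drop_eq_nil_iff] at h; omega)
  simp only [g2]
  rw [hacc]
  congr 1
  rw [PySem.List.pySetD_natCast]
  rw [List.replicate_succ', List.append_assoc, List.set_append]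
  simp only [List.length_replicate, lt_irrefl, if_false, Nat.sub_self]
  rw [List.singleton_append, List.set_cons_zero]
  rw [hdrop, suffList, ← hdrop, haccAnd]

theorem foldS (arr : List Int) : ∀ (j : Nat), j + 1 ≤ arr.length →
    (PySem.List.pyRange (j : Int) (-1) (-1)).foldl (stepS arr)
      (List.replicate (j + 1) 0 ++ suffList (arr.drop (j + 1)),
        (arr.drop (j + 1)).reverse.foldl PySem.Int.band (-1))
      = (suffList arr, arr.reverse.foldl PySem.Int.band (-1)) := by
  intro j
  induction j with
  | zero =>
    intro hj
    have hr : PySem.List.pyRange ((0 : Nat) : Int) (-1) (-1) = [((0 : Nat) : Int)] := by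
      rw [PySem.List.pyRange_neg_one_cons (by norm_num)]
      rw [show ((0 : Nat) : Int) - 1 = -1 by norm_num,
        PySem.List.pyRange_neg_one_eq_nil le_rfl]
    rw [hr, List.foldl_cons, List.foldl_nil, stepS_eq arr 0 hj]
    simp
  | succ j ih =>
    intro hj
    rw [PySem.List.pyRange_neg_one_cons (by push_cast; omega)]
    have h1 : ((j + 1 : Nat) : Int) - 1 = (j : Int) := by push_cast; ring
    rw [List.foldl_cons, stepS_eq arr (j + 1) hj, h1]
    exact ih (by omega)

-- the whole backward pass of B computes exactly the suffix-AND list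
theorem suffix_pass_eq (arr : List Int) (hne : arr ≠ []) :
    (PySem.List.pyRange (PySem.List.len arr - 1) (-1) (-1)).foldl (stepS arr)
      (PySem.List.pyRepeat [(0 : Int)] (PySem.List.len arr), -1)
      = (suffList arr, arr.reverse.foldl PySem.Int.band (-1)) := by
  have hlen : 1 ≤ arr.length := List.length_pos_iff.mpr hne
  have hc : PySem.List.len arr - 1 = ((arr.length - 1 : Nat) : Int) := by
    rw [PySem.List.len_eq]; push_cast [hlen]; omega
  have hinit : (PySem.List.pyRepeat [(0 : Int)] (PySem.List.len arr), (-1 : Int))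
      = (List.replicate ((arr.length - 1) + 1) 0 ++ suffList (arr.drop ((arr.length - 1) + 1)),
        (arr.drop ((arr.length - 1) + 1)).reverse.foldl PySem.Int.band (-1)) := by
    rw [PySem.List.pyRepeat_singleton, PySem.List.len_eq]
    have hd : arr.drop ((arr.length - 1) + 1) = [] := List.drop_eq_nil_iff.mpr (by omega)
    rw [hd]
    simp only [suffList, List.append_nil, List.reverse_nil, List.foldl_nil]
    congr 2
    · simp; omega
  rw [hc, hinit]
  exact foldS arr (arr.length - 1) (by omega)

-- bits of a fold of ANDs
theorem testBit_foldl_band : ∀ (l : List Int) (acc : Int) (i : Nat),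
    (l.foldl PySem.Int.band acc).testBit i = (acc.testBit i && l.all (fun x => x.testBit i)) := by
  intro l
  induction l with
  | nil => intro acc i; simp
  | cons x t ih =>
    intro acc i
    rw [List.foldl_cons, ih, band_testBit]
    simp [Bool.and_assoc]

-- once the running AND equals the AND of the whole remaining list, it can never change again
theorem foldl_band_stable (t u : List Int) (acc : Int) (hu : u <+: t)
    (h : t.foldl PySem.Int.band acc = acc) : u.foldl PySem.Int.band acc = acc := by
  apply int_ext
  intro i
  have ht := congrArg (fun z : Int => z.testBit i) h
  simp only [testBit_foldl_band] at ht ⊢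
  cases hb : acc.testBit i with
  | false => simp
  | true =>
    rw [hb] at ht
    simp only [Bool.true_and] at ht ⊢
    rw [List.all_eq_true] at ht ⊢
    intro x hx
    exact ht x (hu.sublist.mem hx)

-- B's inner loop over element lists
def innerList (target s : Int) : List Int → Int → Int → Int
  | [], r, _ => r
  | x :: t, r, acc =>
    let a := PySem.Int.band acc x
    if a ≠ acc then
      if a = s then min r |a - target|
      else innerList target s t (min r |a - target|) a
    else innerList target s t r acc

theorem innerList_cons (target s x : Int) (t : List Int) (r acc : Int) :
    innerList target s (x :: t) r acc =
      if PySem.Int.band acc x ≠ acc then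
        if PySem.Int.band acc x = s then min r |PySem.Int.band acc x - target|
        else innerList target s t (min r |PySem.Int.band acc x - target|) (PySem.Int.band acc x)
      else innerList target s t r acc := rfl

theorem innerB_eq_innerList (arr : List Int) (target : Int) : ∀ (d k : Nat),
    k + d = arr.length → ∀ (s r acc : Int),
    innerB arr target s (PySem.List.pyRange (k : Int) (PySem.List.len arr) 1) r acc
      = innerList target s (arr.drop k) r acc := by
  intro d
  induction d with
  | zero =>
    intro k hk s r acc
    rw [PySem.List.len_eq, PySem.List.pyRange_one_eq_nil (by omega),
      List.drop_eq_nil_iff.mpr (by omega)]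
    rfl
  | succ d ih =>
    intro k hk s r acc
    have hklt : k < arr.length := by omega
    have hcons : PySem.List.pyRange (k : Int) (PySem.List.len arr) 1
        = (k : Int) :: PySem.List.pyRange ((k : Int) + 1) (PySem.List.len arr) 1 := by
      rw [PySem.List.len_eq]; exact PySem.List.pyRange_one_cons (by omega)
    have hdrop : arr.drop k = arr[k] :: arr.drop (k + 1) := List.drop_eq_getElem_cons hklt
    have hget : PySem.List.pyGetD arr (k : Int) 0 = arr[k] := by
      rw [PySem.List.pyGetD_natCast]
      exact List.getD_eq_getElem _ _ (by omega)
    rw [hcons, hdrop]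
    show (let a := PySem.Int.band acc (PySem.List.pyGetD arr (k : Int) 0)
      if a ≠ acc then
        if a = s then min r |a - target|
        else innerB arr target s (PySem.List.pyRange ((k : Int) + 1) (PySem.List.len arr) 1)
          (min r |a - target|) a
      else innerB arr target s (PySem.List.pyRange ((k : Int) + 1) (PySem.List.len arr) 1) r acc)
      = innerList target s (arr[k] :: arr.drop (k + 1)) r acc
    rw [innerList_cons]
    simp only [hget]
    rw [show ((k : Int) + 1) = ((k + 1 : Nat) : Int) by push_cast; ring]
    split
    · split
      · rfl
      · exact ih (k + 1) (by omega) s _ _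
    · exact ih (k + 1) (by omega) s _ _

theorem innerListSpec (target : Int) : ∀ (l : List Int) (s r acc : Int),
    s = l.foldl PySem.Int.band acc → r ≤ |acc - target| →
    innerList target s l r acc ≤ r ∧
    (∀ q, q ≠ [] → q <+: l →
      innerList target s l r acc ≤ |q.foldl PySem.Int.band acc - target|) ∧
    (innerList target s l r acc = r ∨
      ∃ q, q ≠ [] ∧ q <+: l ∧
        innerList target s l r acc = |q.foldl PySem.Int.band acc - target|) := by
  intro l
  induction l with
  | nil =>
    intro s r acc _ _
    refine ⟨le_rfl, ?_, Or.inl rfl⟩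
    intro q hq hpre
    simp [List.prefix_nil] at hpre
    exact absurd hpre hq
  | cons x t ih =>
    intro s r acc hs hr
    rw [List.foldl_cons] at hs
    rw [innerList_cons]
    split_ifs with hne ha
    · -- changed, and hit the suffix AND: break; later prefixes cannot change the value further
      have hstable : t.foldl PySem.Int.band (PySem.Int.band acc x) = PySem.Int.band acc x := by
        rw [← hs]; exact ha.symm
      refine ⟨min_le_left _ _, ?_, ?_⟩
      · intro q hq hpre
        cases q with
        | nil => exact absurd rfl hq
        | cons y u =>
          obtain ⟨rfl, hu⟩ := List.cons_prefix_cons.mp hpre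
          rw [List.foldl_cons, foldl_band_stable t u (PySem.Int.band acc y) hu hstable]
          exact min_le_right _ _
      · rcases min_cases r |PySem.Int.band acc x - target| with ⟨hm, _⟩ | ⟨hm, _⟩
        · exact Or.inl hm
        · exact Or.inr ⟨[x], by simp, by simp, by rw [hm]; simp⟩
    · -- changed, recurse with the new value recorded
      obtain ⟨i1, i2, i3⟩ := ih s (min r |PySem.Int.band acc x - target|) (PySem.Int.band acc x)
        hs (min_le_right _ _)
      refine ⟨le_trans i1 (min_le_left _ _), ?_, ?_⟩
      · intro q hq hpre
        cases q with
        | nil => exact absurd rfl hq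
        | cons y u =>
          obtain ⟨rfl, hu⟩ := List.cons_prefix_cons.mp hpre
          cases u with
          | nil => simpa using le_trans i1 (min_le_right _ _)
          | cons z w => simpa using i2 (z :: w) (by simp) hu
      · rcases i3 with he | ⟨q, hq, hpre, he⟩
        · rcases min_cases r |PySem.Int.band acc x - target| with ⟨hm, _⟩ | ⟨hm, _⟩
          · exact Or.inl (by rw [he, hm])
          · exact Or.inr ⟨[x], by simp, by simp, by rw [he, hm]; simp⟩
        · exact Or.inr ⟨x :: q, by simp, List.cons_prefix_cons.mpr ⟨rfl, hpre⟩, by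
            rw [he]; simp⟩
    · -- unchanged: the value |acc - target| is already folded into r (hypothesis hr)
      have hacc : PySem.Int.band acc x = acc := by
        by_contra h; exact hne h
      obtain ⟨i1, i2, i3⟩ := ih s r acc (by rw [hs, hacc]) hr
      refine ⟨i1, ?_, ?_⟩
      · intro q hq hpre
        cases q with
        | nil => exact absurd rfl hq
        | cons y u =>
          obtain ⟨rfl, hu⟩ := List.cons_prefix_cons.mp hpre
          rw [List.foldl_cons, hacc]
          cases u with
          | nil => exact le_trans i1 hr
          | cons z w => exact i2 (z :: w) (by simp) hu
      · rcases i3 with he | ⟨q, hq, hpre, he⟩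
        · exact Or.inl he
        · refine Or.inr ⟨x :: q, by simp, List.cons_prefix_cons.mpr ⟨rfl, hpre⟩, ?_⟩
          rw [he, List.foldl_cons, hacc]

-- one iteration of B's outer loop, over an abstract head/tail of the remaining suffix
theorem bodySpec (target c : Int) (t : List Int) (r : Int) :
    (if c = andOf (c :: t) then min r |c - target|
      else innerList target (andOf (c :: t)) t (min r |c - target|) c) ≤ r ∧
    (∀ q, q ≠ [] → q <+: (c :: t) →
      (if c = andOf (c :: t) then min r |c - target|
        else innerList target (andOf (c :: t)) t (min r |c - target|) c) ≤ |andOf q - target|) ∧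
    ((if c = andOf (c :: t) then min r |c - target|
        else innerList target (andOf (c :: t)) t (min r |c - target|) c) = r ∨
      ∃ q, q ≠ [] ∧ q <+: (c :: t) ∧
        (if c = andOf (c :: t) then min r |c - target|
          else innerList target (andOf (c :: t)) t (min r |c - target|) c) = |andOf q - target|) := by
  have handOf : andOf (c :: t) = t.foldl PySem.Int.band c := rfl
  split_ifs with hg
  · -- arr[i] already equals the suffix AND: nothing below can change the value
    have hstable : t.foldl PySem.Int.band c = c := by rw [← handOf, ← hg]
    refine ⟨min_le_left _ _, ?_, ?_⟩
    · intro q hq hpre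
      cases q with
      | nil => exact absurd rfl hq
      | cons y u =>
        obtain ⟨rfl, hu⟩ := List.cons_prefix_cons.mp hpre
        have : andOf (y :: u) = u.foldl PySem.Int.band y := rfl
        rw [this, foldl_band_stable t u y hu hstable]
        exact min_le_right _ _
    · rcases min_cases r |c - target| with ⟨hm, _⟩ | ⟨hm, _⟩
      · exact Or.inl hm
      · exact Or.inr ⟨[c], by simp, by simp, by rw [hm]; simp [andOf]⟩
  · obtain ⟨i1, i2, i3⟩ := innerListSpec target t (andOf (c :: t)) (min r |c - target|) c
      handOf (min_le_right _ _)
    refine ⟨le_trans i1 (min_le_left _ _), ?_, ?_⟩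
    · intro q hq hpre
      cases q with
      | nil => exact absurd rfl hq
      | cons y u =>
        obtain ⟨rfl, hu⟩ := List.cons_prefix_cons.mp hpre
        have hq' : andOf (y :: u) = u.foldl PySem.Int.band y := rfl
        rw [hq']
        cases u with
        | nil => exact le_trans i1 (min_le_right _ _)
        | cons z w => exact i2 (z :: w) (by simp) hu
    · rcases i3 with he | ⟨q, hq, hpre, he⟩
      · rcases min_cases r |c - target| with ⟨hm, _⟩ | ⟨hm, _⟩
        · exact Or.inl (by rw [he, hm])
        · exact Or.inr ⟨[c], by simp, by simp, by rw [he, hm]; simp [andOf]⟩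
      · exact Or.inr ⟨c :: q, by simp, List.cons_prefix_cons.mpr ⟨rfl, hpre⟩, by
          rw [he]; rfl⟩

-- the outer loop of B: fold over start indices k, k+1, …, n-1
theorem outerSpec (arr : List Int) (target : Int) : ∀ (d k : Nat), k + d = arr.length → ∀ (r : Int),
    ((PySem.List.pyRange (k : Int) (PySem.List.len arr) 1).foldl (fun r i =>
        if PySem.List.pyGetD arr i 0 = PySem.List.pyGetD (suffList arr) i 0 then
          min r |PySem.List.pyGetD arr i 0 - target|
        else innerB arr target (PySem.List.pyGetD (suffList arr) i 0)
          (PySem.List.pyRange (i + 1) (PySem.List.len arr) 1)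
          (min r |PySem.List.pyGetD arr i 0 - target|) (PySem.List.pyGetD arr i 0)) r) ≤ r ∧
    (∀ m, m ≠ [] → m <:+: arr.drop k →
      ((PySem.List.pyRange (k : Int) (PySem.List.len arr) 1).foldl (fun r i =>
        if PySem.List.pyGetD arr i 0 = PySem.List.pyGetD (suffList arr) i 0 then
          min r |PySem.List.pyGetD arr i 0 - target|
        else innerB arr target (PySem.List.pyGetD (suffList arr) i 0)
          (PySem.List.pyRange (i + 1) (PySem.List.len arr) 1)
          (min r |PySem.List.pyGetD arr i 0 - target|) (PySem.List.pyGetD arr i 0)) r)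
        ≤ |andOf m - target|) ∧
    (((PySem.List.pyRange (k : Int) (PySem.List.len arr) 1).foldl (fun r i =>
        if PySem.List.pyGetD arr i 0 = PySem.List.pyGetD (suffList arr) i 0 then
          min r |PySem.List.pyGetD arr i 0 - target|
        else innerB arr target (PySem.List.pyGetD (suffList arr) i 0)
          (PySem.List.pyRange (i + 1) (PySem.List.len arr) 1)
          (min r |PySem.List.pyGetD arr i 0 - target|) (PySem.List.pyGetD arr i 0)) r) = r ∨
      ∃ m, m ≠ [] ∧ m <:+: arr.drop k ∧
        ((PySem.List.pyRange (k : Int) (PySem.List.len arr) 1).foldl (fun r i =>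
          if PySem.List.pyGetD arr i 0 = PySem.List.pyGetD (suffList arr) i 0 then
            min r |PySem.List.pyGetD arr i 0 - target|
          else innerB arr target (PySem.List.pyGetD (suffList arr) i 0)
            (PySem.List.pyRange (i + 1) (PySem.List.len arr) 1)
            (min r |PySem.List.pyGetD arr i 0 - target|) (PySem.List.pyGetD arr i 0)) r)
          = |andOf m - target|) := by
  intro d
  induction d with
  | zero =>
    intro k hk r
    have hnil : PySem.List.pyRange (k : Int) (PySem.List.len arr) 1 = [] := by
      rw [PySem.List.len_eq]; exact PySem.List.pyRange_one_eq_nil (by omega)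
    rw [hnil, List.foldl_nil]
    refine ⟨le_rfl, ?_, Or.inl rfl⟩
    intro m hm hinf
    rw [List.drop_eq_nil_iff.mpr (by omega)] at hinf
    simp [List.infix_nil] at hinf
    exact absurd hinf hm
  | succ d ih =>
    intro k hk r
    have hklt : k < arr.length := by omega
    have hcons : PySem.List.pyRange (k : Int) (PySem.List.len arr) 1
        = (k : Int) :: PySem.List.pyRange ((k : Int) + 1) (PySem.List.len arr) 1 := by
      rw [PySem.List.len_eq]; exact PySem.List.pyRange_one_cons (by omega)
    rw [hcons, List.foldl_cons]
    have hdropk : arr.drop k = arr[k] :: arr.drop (k + 1) := List.drop_eq_getElem_cons hklt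
    have hget : PySem.List.pyGetD arr (k : Int) 0 = arr[k] := by
      rw [PySem.List.pyGetD_natCast]
      exact List.getD_eq_getElem _ _ (by omega)
    have hsuff : PySem.List.pyGetD (suffList arr) (k : Int) 0 = andOf (arr.drop k) := by
      rw [PySem.List.pyGetD_natCast]
      exact suffList_getD arr k hklt
    have hinner : innerB arr target (PySem.List.pyGetD (suffList arr) (k : Int) 0)
        (PySem.List.pyRange ((k : Int) + 1) (PySem.List.len arr) 1)
        (min r |PySem.List.pyGetD arr (k : Int) 0 - target|) (PySem.List.pyGetD arr (k : Int) 0)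
        = innerList target (andOf (arr.drop k)) (arr.drop (k + 1))
          (min r |arr[k] - target|) arr[k] := by
      rw [hsuff, hget, show ((k : Int) + 1) = ((k + 1 : Nat) : Int) by push_cast; ring]
      exact innerB_eq_innerList arr target (arr.length - (k + 1)) (k + 1) (by omega) _ _ _
    rw [hinner, hget, hsuff]
    obtain ⟨b1, b2, b3⟩ := bodySpec target arr[k] (arr.drop (k + 1)) r
    rw [← hdropk] at b1 b2 b3
    set r1 : Int := (if arr[k] = andOf (arr.drop k) then min r |arr[k] - target|
      else innerList target (andOf (arr.drop k)) (arr.drop (k + 1)) (min r |arr[k] - target|)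
        arr[k]) with hr1
    have hcast : ((k : Int) + 1) = ((k + 1 : Nat) : Int) := by push_cast; ring
    rw [hcast]
    obtain ⟨o1, o2, o3⟩ := ih (k + 1) (by omega) r1
    refine ⟨le_trans o1 b1, ?_, ?_⟩
    · intro m hm hinf
      rw [hdropk] at hinf
      rcases List.infix_cons_iff.mp hinf with hpfx | hinf'
      · exact le_trans o1 (b2 m hm (by rw [hdropk]; exact hpfx))
      · exact o2 m hm hinf'
    · rcases o3 with he | ⟨m, hm, hinf, he⟩
      · rcases b3 with he1 | ⟨q, hq, hpre, he1⟩
        · exact Or.inl (by rw [he]; exact hr1.trans he1)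
        · exact Or.inr ⟨q, hq, hpre.isInfix, by rw [he]; exact hr1.trans he1⟩
      · exact Or.inr ⟨m, hm, (List.IsInfix.trans hinf (by
          rw [hdropk]; exact (List.suffix_cons _ _).isInfix) : m <:+: arr.drop k), he⟩

theorem pyGet?_zero (arr : List Int) (a0 : Int) (rest : List Int) (h : arr = a0 :: rest) :
    PySem.List.pyGet? arr 0 = some a0 := by
  subst h; simp [PySem.List.pyGet?, PySem.List.pyIdx?]

theorem B_eq (arr : List Int) (target : Int) (hne : arr ≠ []) :
    (∃ v, Seg arr v ∧ closestToTarget_alt arr target = |v - target|) ∧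
      (∀ v, Seg arr v → closestToTarget_alt arr target ≤ |v - target|) := by
  obtain ⟨a0, rest, harr⟩ : ∃ a0 rest, arr = a0 :: rest := by
    cases arr with
    | nil => exact absurd rfl hne
    | cons a0 rest => exact ⟨a0, rest, rfl⟩
  unfold closestToTarget_alt
  rw [pyGet?_zero arr a0 rest harr]
  simp only
  rw [suffix_pass_eq arr hne]
  obtain ⟨o1, o2, o3⟩ := outerSpec arr target arr.length 0 (by simp) (|a0 - target|)
  rw [show ((0 : Nat) : Int) = (0 : Int) from rfl] at o1 o2 o3
  simp only [List.drop_zero] at o2 o3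
  constructor
  · rcases o3 with he | ⟨m, hm, hinf, he⟩
    · exact ⟨a0, harr ▸ Seg_head a0 rest, he⟩
    · exact ⟨andOf m, ⟨m, hm, hinf, rfl⟩, he⟩
  · rintro v ⟨m, hm, hinf, rfl⟩
    exact o2 m hm hinf

-- ===== VERDICT (by name: the statement is the Claim_ definition above) =====
theorem closestToTarget_spec : Claim_equal_closestToTarget := by
  intro arr target _ hne
  unfold Spec_closestToTarget
  obtain ⟨m, hm, ⟨v, hv, hmv⟩, hmin⟩ := A_eq arr target hne
  obtain ⟨⟨w, hw, hbw⟩, hbmin⟩ := B_eq arr target hne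
  rw [hm]
  have h1 := hmin w hw
  have h2 := hbmin v hv
  omega
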